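-- pv_equiv track=rewrite | github.com/Isaac51743/Algorithms-in-Python | src/Recursion/Recursion2.py | abbrevmatch
-- ===== SOURCE A (Python) =====
-- def isdigit(st):
--     if ord(st) >= ord('0') and ord(st) <= ord('9'):
--         return True
--     return False
--
-- def abbrevmatch(st, abbre, start1, start2):
--     if start1 == len(st) and start2 == len(abbre):
--         return True
--     elif start1 == len(st) or start2 == len(abbre):
--         return False
--
--     if isdigit(abbre[start2]):
--         idx = start2             # idx for abbre
--         num = 0
--         # read the num
--         while idx < len(abbre) and isdigit(abbre[idx]):
--             num = num * 10 + ord(abbre[idx]) - ord('0')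
--             idx += 1
--         if num > len(st) - start1:
--             return False
--         else:
--             return abbrevmatch(st, abbre, start1 + num, idx)
--     else:
--         if st[start1] == abbre[start2]:
--             return abbrevmatch(st, abbre, start1 + 1, start2 + 1)
--         else:
--             return False
-- ===== SOURCE B (Python) =====
-- def abbrevmatch(st, abbre, start1, start2):
--     n, m = len(st), len(abbre)
--     # pass 1: tokenize abbre[start2:] into literal chars and numeric skip counts
--     tokens = []
--     j = start2
--     while j < m:
--         if '0' <= abbre[j] <= '9':
--             num = 0
--             while j < m and '0' <= abbre[j] <= '9':
--                 num = num * 10 + (ord(abbre[j]) - ord('0'))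
--                 j += 1
--             tokens.append(num)
--         else:
--             tokens.append(abbre[j])
--             j += 1
--     # pass 2: consume the tokens against st
--     i = start1
--     for t in tokens:
--         if i == n:
--             return False
--         if isinstance(t, int):
--             if t > n - i:
--                 return False
--             i += t
--         else:
--             if st[i] != t:
--                 return False
--             i += 1
--     return i == n
-- ===== Notes on version B (the rewrite author's own statement) =====
-- stated objective: alternative
-- what changed: Replaced the single recursive matcher by a two-pass staged design: first tokenize the abbreviation suffix once into a list of literal-char and skip-count tokens, then consume that token list against the string with a separate matcher.
-- outside the precondition, e.g. on abbrevmatch('a', '', 1, 5): A returns False, B returns True; on abbrevmatch('abc', '5', -9, 0): A returns False, B returns False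
import Mathlib
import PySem

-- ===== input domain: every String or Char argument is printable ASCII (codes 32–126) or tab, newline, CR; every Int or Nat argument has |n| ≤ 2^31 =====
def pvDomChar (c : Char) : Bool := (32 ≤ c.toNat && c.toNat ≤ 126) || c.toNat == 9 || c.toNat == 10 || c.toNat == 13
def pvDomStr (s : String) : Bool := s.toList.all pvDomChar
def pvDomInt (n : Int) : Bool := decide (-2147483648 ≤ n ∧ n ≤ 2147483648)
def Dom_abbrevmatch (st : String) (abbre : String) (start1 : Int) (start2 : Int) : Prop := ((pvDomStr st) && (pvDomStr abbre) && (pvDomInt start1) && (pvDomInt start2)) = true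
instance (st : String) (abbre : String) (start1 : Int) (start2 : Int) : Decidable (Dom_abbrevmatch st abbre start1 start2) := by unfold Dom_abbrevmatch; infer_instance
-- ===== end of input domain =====

-- B replaces A's single recursion by a staged two-pass design (tokenize the abbreviation
-- suffix once into literal/skip tokens, then consume the token list against the string);
-- same return value on all in-range start positions (objective: alternative, not faster).
-- A's port uses a fuel counter only as a totality guard; inside Pre_ the initial fuel
-- exceeds the number of recursive calls the Python performs.

-- ===== PORT A =====
-- helper isdigit(st): ord comparison, as in the Python
def pvIsdigitA (c : Char) : Bool :=
  if (48:Int) ≤ (c.toNat : Int) ∧ (c.toNat : Int) ≤ 57 then true else false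

-- A's inner 'while idx < len(abbre) and isdigit(abbre[idx])' number reader
def pvReadNumA (abbre : List Char) : Nat → Int → Int → Int × Int
  | 0, num, idx => (num, idx)   -- fuel exhausted: never reached from pvFuelA inside Pre_
  | fuel + 1, num, idx =>
    if idx < (abbre.length : Int) then
      match PySem.List.pyGet? abbre idx with
      | some c =>
          if pvIsdigitA c then pvReadNumA abbre fuel (num * 10 + (c.toNat : Int) - 48) (idx + 1)
          else (num, idx)
      | none => (num, idx)   -- unreachable for idx in range
    else (num, idx)

def pvFuelA (abbre : List Char) : Nat := 2 * abbre.length + 2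

def abbrevmatchGo (st : List Char) (abbre : List Char) : Nat → Int → Int → Bool
  | 0, _, _ => false   -- fuel exhausted: never reached from pvFuelA inside Pre_
  | fuel + 1, start1, start2 =>
    if start1 = (st.length : Int) ∧ start2 = (abbre.length : Int) then true
    else if start1 = (st.length : Int) ∨ start2 = (abbre.length : Int) then false
    else
      match PySem.List.pyGet? abbre start2 with
      | none => false   -- Python raises IndexError here (outside Pre_)
      | some c =>
        if pvIsdigitA c then
          let p := pvReadNumA abbre (pvFuelA abbre) 0 start2
          if p.1 > (st.length : Int) - start1 then false
          else abbrevmatchGo st abbre fuel (start1 + p.1) p.2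
        else
          match PySem.List.pyGet? st start1 with
          | none => false   -- Python raises IndexError here (outside Pre_)
          | some c1 =>
            if c1 = c then abbrevmatchGo st abbre fuel (start1 + 1) (start2 + 1) else false

def abbrevmatch (st : String) (abbre : String) (start1 : Int) (start2 : Int) : Bool :=
  abbrevmatchGo st.toList abbre.toList (pvFuelA abbre.toList) start1 start2

-- ===== PORT B =====
-- a token of B's first pass: a literal character or a numeric skip count
inductive PvTok : Type
  | lit : Char → PvTok
  | skip : Int → PvTok
deriving DecidableEq, Repr

-- B's "'0' <= c <= '9'" test
def pvIsdigitB (c : Char) : Bool := decide (48 ≤ c.toNat ∧ c.toNat ≤ 57)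

-- B's "'0' <= abbre[j] <= '9'" guard (none = IndexError in Python, outside Pre_)
def pvDigitAtB (abbre : List Char) (j : Int) : Bool :=
  ((PySem.List.pyGet? abbre j).map pvIsdigitB).getD false

-- B's inner digit-run loop 'while j < m and digit: num = num*10+...'
def pvRunB (abbre : List Char) : Nat → Int → Int → Int × Int
  | 0, num, k => (num, k)   -- fuel exhausted: never reached from pvFuelB inside Pre_
  | fuel + 1, num, k =>
    if k < (abbre.length : Int) then
      match PySem.List.pyGet? abbre k with
      | some c =>
          if pvIsdigitB c then pvRunB abbre fuel (num * 10 + ((c.toNat : Int) - 48)) (k + 1)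
          else (num, k)
      | none => (num, k)
    else (num, k)

def pvFuelB (abbre : List Char) : Nat := 2 * abbre.length + 2

-- B's outer tokenize loop 'while j < m': builds the token list of abbre[j:]
def pvTokenizeB (abbre : List Char) : Nat → Int → List PvTok
  | 0, _ => []   -- fuel exhausted: never reached from pvFuelB inside Pre_
  | fuel + 1, j =>
    if j < (abbre.length : Int) then
      if pvDigitAtB abbre j then
        let p := pvRunB abbre (pvFuelB abbre) 0 j
        PvTok.skip p.1 :: pvTokenizeB abbre fuel p.2
      else
        match PySem.List.pyGet? abbre j with
        | some c => PvTok.lit c :: pvTokenizeB abbre fuel (j + 1)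
        | none => []   -- Python raises IndexError here (outside Pre_)
    else []

-- B's second pass: consume the token list against st
def pvMatchToksB (st : List Char) : Int → List PvTok → Bool
  | i, [] => decide (i = (st.length : Int))
  | i, t :: ts =>
    if i = (st.length : Int) then false
    else
      match t with
      | PvTok.skip k =>
          if k > (st.length : Int) - i then false else pvMatchToksB st (i + k) ts
      | PvTok.lit c =>
          match PySem.List.pyGet? st i with
          | some c1 => if c1 ≠ c then false else pvMatchToksB st (i + 1) ts
          | none => false   -- Python raises IndexError here (outside Pre_)

def abbrevmatch_alt (st : String) (abbre : String) (start1 : Int) (start2 : Int) : Bool :=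
  pvMatchToksB st.toList start1 (pvTokenizeB abbre.toList (pvFuelB abbre.toList) start2)

-- ===== PRECONDITION & SPEC =====
-- Pre_ admits an exhausted abbreviation position (start2 = len(abbre), any start1), both
-- starts inside Python's index wrap range [-len, len], and a start1 past the end when the
-- abbreviation position holds a digit (there the skip-count bound fires before any index).
-- Outside it A almost always raises IndexError, and in the remaining degenerate corners
-- (a start far out of range while an exhaustion equality or the skip-count bound happens to
-- fire first) A's early False is an artefact of its check ordering on nonsensical starts.
def Pre_abbrevmatch (st : String) (abbre : String) (start1 : Int) (start2 : Int) : Prop :=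
  start2 = (abbre.length : Int) ∨
  (-(abbre.length : Int) ≤ start2 ∧ start2 ≤ (abbre.length : Int) ∧
   ((-(st.length : Int) ≤ start1 ∧ start1 ≤ (st.length : Int)) ∨
    (start1 > (st.length : Int) ∧ start2 < (abbre.length : Int) ∧
     ((PySem.List.pyGet? abbre.toList start2).map
        (fun c => decide (48 ≤ c.toNat ∧ c.toNat ≤ 57))).getD false = true)))
instance (st : String) (abbre : String) (start1 : Int) (start2 : Int) : Decidable (Pre_abbrevmatch st abbre start1 start2) := by unfold Pre_abbrevmatch; infer_instance

def pvWitness_abbrevmatch : String × String × Int × Int := ("word", "w2d", 0, 0)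

def Spec_abbrevmatch (st : String) (abbre : String) (start1 : Int) (start2 : Int) (out : Bool) : Prop := out = abbrevmatch_alt st abbre start1 start2
instance (st : String) (abbre : String) (start1 : Int) (start2 : Int) (out : Bool) : Decidable (Spec_abbrevmatch st abbre start1 start2 out) := by unfold Spec_abbrevmatch; infer_instance

-- ===== CLAIM (what is proved, stated in full; the proofs are below) =====
def Claim_equal_abbrevmatch : Prop := ∀ (st : String) (abbre : String) (start1 : Int) (start2 : Int), Dom_abbrevmatch st abbre start1 start2 → Pre_abbrevmatch st abbre start1 start2 → Spec_abbrevmatch st abbre start1 start2 (abbrevmatch st abbre start1 start2)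

-- ===== LEMMAS AND PROOFS =====

-- the two digit tests agree
theorem pvIsdigit_eq (c : Char) : pvIsdigitA c = pvIsdigitB c := by
  unfold pvIsdigitA pvIsdigitB
  by_cases h : (48:Int) ≤ (c.toNat : Int) ∧ (c.toNat : Int) ≤ 57
  · rw [if_pos h]; symm; simp only [decide_eq_true_eq]; omega
  · rw [if_neg h]; symm; simp only [decide_eq_false_iff_not]; omega

-- A's number reader and B's digit-run loop are the same loop
theorem pvReadNumA_eq (abbre : List Char) : ∀ (fuel : Nat) (num k : Int),
    pvReadNumA abbre fuel num k = pvRunB abbre fuel num k := by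
  intro fuel
  induction fuel with
  | zero => intro num k; rfl
  | succ fuel ih =>
    intro num k
    simp only [pvReadNumA, pvRunB]
    by_cases h : k < (abbre.length : Int)
    · rw [if_pos h, if_pos h]
      cases hg : PySem.List.pyGet? abbre k with
      | none => rfl
      | some c =>
        simp only [pvIsdigit_eq]
        by_cases hd : pvIsdigitB c = true
        · rw [if_pos hd, if_pos hd]
          rw [show num * 10 + (c.toNat : Int) - 48 = num * 10 + ((c.toNat : Int) - 48) from by ring]
          exact ih _ (k + 1)
        · rw [if_neg hd, if_neg hd]
    · rw [if_neg h, if_neg h]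

-- the digit-run loop only moves its index forward
theorem pvRunB_ge (abbre : List Char) : ∀ (fuel : Nat) (num k : Int),
    k ≤ (pvRunB abbre fuel num k).2 := by
  intro fuel
  induction fuel with
  | zero => intro num k; exact le_refl k
  | succ fuel ih =>
    intro num k
    simp only [pvRunB]
    by_cases h : k < (abbre.length : Int)
    · rw [if_pos h]
      cases hg : PySem.List.pyGet? abbre k with
      | none => exact le_refl k
      | some c =>
        by_cases hd : pvIsdigitB c = true
        · simp only [hd, if_true]; exact le_trans (by omega) (ih _ (k + 1))
        · simp [hd]
    · rw [if_neg h]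

-- the digit-run loop never moves past the end of the abbreviation
theorem pvRunB_le (abbre : List Char) : ∀ (fuel : Nat) (num k : Int),
    k ≤ (abbre.length : Int) → (pvRunB abbre fuel num k).2 ≤ (abbre.length : Int) := by
  intro fuel
  induction fuel with
  | zero => intro num k hk; exact hk
  | succ fuel ih =>
    intro num k hk
    simp only [pvRunB]
    by_cases h : k < (abbre.length : Int)
    · rw [if_pos h]
      cases hg : PySem.List.pyGet? abbre k with
      | none => exact hk
      | some c =>
        by_cases hd : pvIsdigitB c = true
        · simp only [hd, if_true]; exact ih _ (k + 1) (by omega)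
        · simp only [hd, Bool.false_eq_true, if_false]; exact hk
    · rw [if_neg h]; exact hk

-- MAIN LEMMA: A's fueled recursion equals B's tokenize-then-match pipeline at every
-- state whose abbreviation index lies in the wrap range, given enough fuel on both sides
theorem pvMain (st abbre : List Char) : ∀ (fuelA fuelT : Nat) (i j : Int),
    -(abbre.length : Int) ≤ j → j ≤ (abbre.length : Int) →
    ((abbre.length : Int) - j).toNat < fuelA → ((abbre.length : Int) - j).toNat < fuelT →
    abbrevmatchGo st abbre fuelA i j = pvMatchToksB st i (pvTokenizeB abbre fuelT j) := by
  intro fuelA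
  induction fuelA with
  | zero => intro fuelT i j _ _ hfA _; omega
  | succ fuelA ih =>
    intro fuelT i j hjl hju hfA hfT
    obtain ⟨fuelT, rfl⟩ : ∃ f, fuelT = f + 1 := ⟨fuelT - 1, by omega⟩
    simp only [abbrevmatchGo, pvTokenizeB]
    by_cases hjm : j = (abbre.length : Int)
    · -- abbreviation exhausted: tokens = [], both sides reduce to i = len(st)
      rw [if_neg (by omega : ¬ j < (abbre.length : Int))]
      by_cases hin : i = (st.length : Int)
      · rw [if_pos ⟨hin, hjm⟩]; simp [pvMatchToksB, hin]
      · have hne : ¬(i = (st.length : Int) ∧ j = (abbre.length : Int)) := fun h => hin h.1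
        rw [if_neg hne, if_pos (Or.inr hjm)]; simp [pvMatchToksB, hin]
    · have hjlt : j < (abbre.length : Int) := by omega
      obtain ⟨c, hg⟩ : ∃ c, PySem.List.pyGet? abbre j = some c := by
        cases hgg : PySem.List.pyGet? abbre j with
        | none =>
          rw [PySem.List.pyGet?_eq_none_iff] at hgg
          exact absurd (by unfold PySem.Raise.InRange; omega) hgg
        | some c => exact ⟨c, rfl⟩
      have hne : ¬(i = (st.length : Int) ∧ j = (abbre.length : Int)) := fun h => hjm h.2
      rw [if_neg hne, if_pos hjlt]
      simp only [hg, pvIsdigit_eq]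
      by_cases hd : pvIsdigitB c = true
      · -- digit token
        have hdat : pvDigitAtB abbre j = true := by rw [pvDigitAtB, hg]; simpa using hd
        have hr : pvReadNumA abbre (pvFuelA abbre) 0 j = pvRunB abbre (pvFuelB abbre) 0 j := by
          rw [pvReadNumA_eq]; rfl
        have hge : j + 1 ≤ (pvRunB abbre (pvFuelB abbre) 0 j).2 := by
          have hstep : pvRunB abbre (pvFuelB abbre) 0 j
              = pvRunB abbre (pvFuelB abbre - 1) (0 * 10 + ((c.toNat : Int) - 48)) (j + 1) := by
            rw [show pvFuelB abbre = (pvFuelB abbre - 1) + 1 from by unfold pvFuelB; omega]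
            simp only [pvRunB]
            rw [if_pos hjlt, hg]
            simp [hd]
          rw [hstep]
          exact pvRunB_ge abbre _ _ (j + 1)
        have hle : (pvRunB abbre (pvFuelB abbre) 0 j).2 ≤ (abbre.length : Int) :=
          pvRunB_le abbre _ 0 j (by omega)
        rw [hr]
        simp only [hd, hdat, if_true, pvMatchToksB]
        by_cases hin : i = (st.length : Int)
        · rw [if_pos (Or.inl hin), if_pos hin]
        · rw [if_neg (by rintro (h | h); exact hin h; exact hjm h), if_neg hin]
          by_cases hov : (pvRunB abbre (pvFuelB abbre) 0 j).1 > (st.length : Int) - i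
          · rw [if_pos hov, if_pos hov]
          · rw [if_neg hov, if_neg hov]
            exact ih fuelT (i + (pvRunB abbre (pvFuelB abbre) 0 j).1)
              (pvRunB abbre (pvFuelB abbre) 0 j).2 (by omega) hle (by omega) (by omega)
      · -- literal token
        have hdat : pvDigitAtB abbre j = false := by rw [pvDigitAtB, hg]; simpa using hd
        simp only [hdat, Bool.false_eq_true, if_false, hd, hg, pvMatchToksB]
        by_cases hin : i = (st.length : Int)
        · rw [if_pos (Or.inl hin), if_pos hin]
        · rw [if_neg (by rintro (h | h); exact hin h; exact hjm h), if_neg hin]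
          cases hs : PySem.List.pyGet? st i with
          | none => rfl
          | some c1 =>
            by_cases hc : c1 = c
            · have hrec := ih fuelT (i + 1) (j + 1) (by omega) (by omega) (by omega) (by omega)
              simp [hc, hrec]
            · simp [hc]

-- ===== VERDICT (by name: the statement is the Claim_ definition above) =====
theorem abbrevmatch_spec : Claim_equal_abbrevmatch := by
  intro st abbre start1 start2 _hDom hPre
  have hj : -(abbre.length : Int) ≤ start2 ∧ start2 ≤ (abbre.length : Int) := by
    rcases hPre with h | ⟨h2l, h2u, _⟩
    · constructor <;> omega
    · exact ⟨h2l, h2u⟩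
  obtain ⟨h2l, h2u⟩ := hj
  unfold Spec_abbrevmatch abbrevmatch abbrevmatch_alt
  have hL : (abbre.toList.length : Int) = (abbre.length : Int) := by simp
  exact pvMain st.toList abbre.toList (pvFuelA abbre.toList) (pvFuelB abbre.toList) start1 start2
    (by omega) (by omega) (by unfold pvFuelA; omega) (by unfold pvFuelB; omega)
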